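-- pv_equiv track=rewrite | github.com/nadineelnaggar/Plain-RNN-Counter-Experiments | GenerateTernaryClassificationDataset.py | generateDataset
-- ===== SOURCE A (Python) =====
-- class Dyck1_Generator(object):
--     def generateParenthesis(self, n):
--         def generate(A = []):
--             if len(A) == 2*n:
--                 if valid(A):
--                     val.append("".join(A))
--                 elif potentially_valid(A):
--                     potentially_val.append("".join(A))
--                 else:
--                     inval.append("".join(A))
--             else:
--                 A.append('(')
--                 generate(A)
--                 A.pop()
--                 A.append(')')
--                 generate(A)
--                 A.pop()
--
--         def valid(A):
--             bal = 0
--             for c in A: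
--                 if c == '(': bal += 1
--                 else: bal -= 1
--                 if bal < 0: return False
--             return bal == 0
--
--         def potentially_valid(A):
--             bal = 0
--             for c in A:
--                 if c == '(':
--                     bal += 1
--                 else:
--                     bal -= 1
--                 if bal < 0: return False
--             return bal > 0
--
--         val = []
--         potentially_val=[]
--         inval = []
--         generate()
--         return val, potentially_val, inval
--
-- def generateDataset(n_bracket_pairs_start, n_bracket_pairs_end):
--     gen = Dyck1_Generator()
--     # d1_valid, d1_invalid = gen.generateParenthesis(3)
--     d1_valid = []
--     d1_potentially_valid=[]
--     d1_invalid = []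
--     for i in range(n_bracket_pairs_start,n_bracket_pairs_end+1):
--         x,y,z = gen.generateParenthesis(i)
--         for elem in x:
--             d1_valid.append(elem)
--         for elem in y:
--             d1_potentially_valid.append(elem)
--         for elem in z:
--             d1_invalid.append(elem)
--     return d1_valid,d1_potentially_valid,d1_invalid
-- ===== SOURCE B (Python) =====
-- def generateDataset(n_bracket_pairs_start, n_bracket_pairs_end):
--     d1_valid = []
--     d1_potentially_valid = []
--     d1_invalid = []
--     for i in range(n_bracket_pairs_start, n_bracket_pairs_end + 1):
--         # iterative breadth expansion: all 4**i bracket strings of length 2*i,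
--         # in the same lexicographic order ('(' before ')') the DFS produces
--         strs = ['']
--         for _ in range(2 * i):
--             strs = [s + c for s in strs for c in '()']
--         for s in strs:
--             # single balance pass: valid iff never negative and final balance 0,
--             # potentially valid iff never negative and final balance > 0
--             bal = 0
--             neg = False
--             for c in s:
--                 bal += 1 if c == '(' else -1
--                 if bal < 0:
--                     neg = True
--                     break
--             if neg:
--                 d1_invalid.append(s)
--             elif bal == 0:
--                 d1_valid.append(s)
--             else:
--                 d1_potentially_valid.append(s)
--     return d1_valid, d1_potentially_valid, d1_invalid
-- ===== Notes on version B (the rewrite author's own statement) =====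
-- stated objective: idiomatic
-- what changed: Replaces the recursive DFS generator plus two separate validity rescans by an iterative layer-by-layer enumeration of all bracket strings and a single balance pass that classifies each string at once.
-- outside the precondition, e.g. on generateDataset(-1, 0): A raises RecursionError, B returns (['', ''], [], [])
import Mathlib
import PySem

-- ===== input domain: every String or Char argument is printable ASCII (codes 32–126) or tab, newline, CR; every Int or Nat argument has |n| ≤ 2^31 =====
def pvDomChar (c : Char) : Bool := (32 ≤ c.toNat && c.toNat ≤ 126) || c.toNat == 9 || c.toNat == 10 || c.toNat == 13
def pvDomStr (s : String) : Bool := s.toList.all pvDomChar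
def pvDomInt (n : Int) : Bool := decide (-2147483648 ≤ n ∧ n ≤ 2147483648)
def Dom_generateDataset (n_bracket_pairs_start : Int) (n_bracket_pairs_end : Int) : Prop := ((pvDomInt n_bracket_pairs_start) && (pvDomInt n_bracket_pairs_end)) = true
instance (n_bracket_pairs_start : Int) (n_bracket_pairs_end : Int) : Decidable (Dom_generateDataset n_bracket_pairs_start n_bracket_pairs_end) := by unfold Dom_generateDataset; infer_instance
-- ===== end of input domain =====

-- B replaces A's recursive DFS generator and two validity rescans by an iterative
-- layer-by-layer enumeration with a single classifying balance pass (idiomatic, same cost).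

-- ===== PORT A =====
-- helper `valid` of A: early-return balance loop, final test bal == 0
def pvA_validGo : Int → List Char → Bool
  | bal, [] => bal == 0
  | bal, c :: cs =>
    let bal' := if c == '(' then bal + 1 else bal - 1
    if bal' < 0 then false else pvA_validGo bal' cs

def pvA_valid (A : List Char) : Bool := pvA_validGo 0 A

-- helper `potentially_valid` of A: same loop, final test bal > 0
def pvA_potGo : Int → List Char → Bool
  | bal, [] => bal > 0
  | bal, c :: cs =>
    let bal' := if c == '(' then bal + 1 else bal - 1
    if bal' < 0 then false else pvA_potGo bal' cs

def pvA_pot (A : List Char) : Bool := pvA_potGo 0 A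

-- helper `generate` of A: DFS over A, appending "".join(A) to one of the three lists.
-- The fuel argument only makes the recursion structural; the top-level call passes
-- fuel = 2*n (the exact recursion depth from A = []), so the fuel-0 branch is never taken.
def pvA_generate (n : Nat) (fuel : Nat) (A : List Char) (st : List String × List String × List String) : List String × List String × List String :=
  if A.length == 2 * n then
    if pvA_valid A then (st.1 ++ [String.mk A], st.2.1, st.2.2)
    else if pvA_pot A then (st.1, st.2.1 ++ [String.mk A], st.2.2)
    else (st.1, st.2.1, st.2.2 ++ [String.mk A])
  else
    match fuel with
    | 0 => st
    | fuel + 1 => pvA_generate n fuel (A ++ [')']) (pvA_generate n fuel (A ++ ['(']) st)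

def pvA_generateParenthesis (n : Nat) : List String × List String × List String :=
  pvA_generate n (2 * n) [] ([], [], [])

-- body of generateDataset's for-loop over i
def pvA_outerStep (acc : List String × List String × List String) (i : Int) : List String × List String × List String :=
  -- Python's generateParenthesis(i) never returns for i < 0 (RecursionError); Pre_ excludes that
  let xyz := pvA_generateParenthesis i.toNat
  let d1v := xyz.1.foldl (fun l elem => l ++ [elem]) acc.1
  let d1p := xyz.2.1.foldl (fun l elem => l ++ [elem]) acc.2.1
  let d1i := xyz.2.2.foldl (fun l elem => l ++ [elem]) acc.2.2
  (d1v, d1p, d1i)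

def generateDataset (n_bracket_pairs_start : Int) (n_bracket_pairs_end : Int) : List String × List String × List String :=
  (PySem.List.pyRange n_bracket_pairs_start (n_bracket_pairs_end + 1) 1).foldl pvA_outerStep ([], [], [])

-- ===== PORT B =====
-- one expansion layer: [s + c for s in strs for c in '()']
def pvB_expand (xs : List (List Char)) : List (List Char) :=
  xs.flatMap (fun s => [s ++ ['('], s ++ [')']])

-- B's single balance pass: returns (final balance, went-negative flag); breaks on first negative
def pvB_bal : Int → List Char → Int × Bool
  | bal, [] => (bal, false)
  | bal, c :: cs =>
    let bal' := bal + (if c == '(' then 1 else -1)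
    if bal' < 0 then (bal', true) else pvB_bal bal' cs

-- body of B's classification loop over s
def pvB_classifyStep (acc : List String × List String × List String) (s : List Char) : List String × List String × List String :=
  -- Python computes the balance pass once; its two results are the components of pvB_bal 0 s
  if (pvB_bal 0 s).2 then (acc.1, acc.2.1, acc.2.2 ++ [String.mk s])
  else if (pvB_bal 0 s).1 == 0 then (acc.1 ++ [String.mk s], acc.2.1, acc.2.2)
  else (acc.1, acc.2.1 ++ [String.mk s], acc.2.2)

-- body of B's for-loop over i
def pvB_outerStep (acc : List String × List String × List String) (i : Int) : List String × List String × List String :=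
  -- for i < 0 Python's range(2*i) is empty only after 2*i < 0; B raises nowhere here,
  -- but those i are outside Pre_ anyway (A raises); .toNat matches range's empty behaviour
  let L := (2 * i).toNat
  let strs := (List.range L).foldl (fun st _ => pvB_expand st) [[]]
  strs.foldl pvB_classifyStep acc

def generateDataset_alt (n_bracket_pairs_start : Int) (n_bracket_pairs_end : Int) : List String × List String × List String :=
  (PySem.List.pyRange n_bracket_pairs_start (n_bracket_pairs_end + 1) 1).foldl pvB_outerStep ([], [], [])

-- ===== PRECONDITION & SPEC =====
-- Pre_ excludes the inputs where the loop visits a negative i: there Python A recurses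
-- without bound (RecursionError), so A returns no value.
def Pre_generateDataset (n_bracket_pairs_start : Int) (n_bracket_pairs_end : Int) : Prop :=
  0 ≤ n_bracket_pairs_start ∨ n_bracket_pairs_end < n_bracket_pairs_start

instance (n_bracket_pairs_start : Int) (n_bracket_pairs_end : Int) : Decidable (Pre_generateDataset n_bracket_pairs_start n_bracket_pairs_end) := by unfold Pre_generateDataset; infer_instance

def pvWitness_generateDataset : Int × Int := (0, 2)

def Spec_generateDataset (n_bracket_pairs_start : Int) (n_bracket_pairs_end : Int) (out : List String × List String × List String) : Prop := out = generateDataset_alt n_bracket_pairs_start n_bracket_pairs_end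
instance (n_bracket_pairs_start : Int) (n_bracket_pairs_end : Int) (out : List String × List String × List String) : Decidable (Spec_generateDataset n_bracket_pairs_start n_bracket_pairs_end out) := by unfold Spec_generateDataset; infer_instance

-- ===== CLAIM (what is proved, stated in full; the proofs are below) =====
def Claim_equal_generateDataset : Prop := ∀ (n_bracket_pairs_start : Int) (n_bracket_pairs_end : Int), Dom_generateDataset n_bracket_pairs_start n_bracket_pairs_end → Pre_generateDataset n_bracket_pairs_start n_bracket_pairs_end → Spec_generateDataset n_bracket_pairs_start n_bracket_pairs_end (generateDataset n_bracket_pairs_start n_bracket_pairs_end)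

-- ===== LEMMAS AND PROOFS =====

-- all bracket strings of length m, last character varying fastest (B's expansion order)
def pvAllT : Nat → List (List Char)
  | 0 => [[]]
  | m + 1 => pvB_expand (pvAllT m)

-- all bracket strings of length m, first character varying slowest (A's DFS order)
def pvAllS : Nat → List (List Char)
  | 0 => [[]]
  | m + 1 => (pvAllS m).map ('(' :: ·) ++ (pvAllS m).map (')' :: ·)

theorem pvB_expand_map (c : Char) (xs : List (List Char)) :
    pvB_expand (xs.map (c :: ·)) = (pvB_expand xs).map (c :: ·) := by
  simp [pvB_expand, List.flatMap_map, List.map_flatMap]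

theorem pvAllT_split (m : Nat) :
    pvAllT (m + 1) = (pvAllT m).map ('(' :: ·) ++ (pvAllT m).map (')' :: ·) := by
  induction m with
  | zero => rfl
  | succ m ih =>
    calc pvAllT (m + 2) = pvB_expand (pvAllT (m + 1)) := rfl
      _ = pvB_expand ((pvAllT m).map ('(' :: ·) ++ (pvAllT m).map (')' :: ·)) := by rw [ih]
      _ = pvB_expand ((pvAllT m).map ('(' :: ·)) ++ pvB_expand ((pvAllT m).map (')' :: ·)) := by
          simp [pvB_expand]
      _ = (pvB_expand (pvAllT m)).map ('(' :: ·) ++ (pvB_expand (pvAllT m)).map (')' :: ·) := by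
          rw [pvB_expand_map, pvB_expand_map]
      _ = (pvAllT (m + 1)).map ('(' :: ·) ++ (pvAllT (m + 1)).map (')' :: ·) := rfl

theorem pvAllS_eq_pvAllT (m : Nat) : pvAllS m = pvAllT m := by
  induction m with
  | zero => rfl
  | succ m ih => rw [pvAllS, ih, pvAllT_split]

-- the two early-return loops of A compute the same data as B's single pass
theorem pvA_validGo_eq (s : List Char) : ∀ bal,
    pvA_validGo bal s = (!(pvB_bal bal s).2 && (pvB_bal bal s).1 == 0) := by
  induction s with
  | nil => intro bal; simp [pvA_validGo, pvB_bal]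
  | cons c cs ih =>
    intro bal
    have h : (if c == '(' then bal + 1 else bal - 1) = bal + (if c == '(' then (1 : Int) else -1) := by
      split <;> ring
    by_cases hlt : bal + (if c == '(' then (1 : Int) else -1) < 0
    · simp only [pvA_validGo, pvB_bal, h, if_pos hlt]
      simp
    · simp only [pvA_validGo, pvB_bal, h, if_neg hlt]
      exact ih _

theorem pvA_potGo_eq (s : List Char) : ∀ bal,
    pvA_potGo bal s = (!(pvB_bal bal s).2 && decide ((pvB_bal bal s).1 > 0)) := by
  induction s with
  | nil => intro bal; simp [pvA_potGo, pvB_bal]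
  | cons c cs ih =>
    intro bal
    have h : (if c == '(' then bal + 1 else bal - 1) = bal + (if c == '(' then (1 : Int) else -1) := by
      split <;> ring
    by_cases hlt : bal + (if c == '(' then (1 : Int) else -1) < 0
    · simp only [pvA_potGo, pvB_bal, h, if_pos hlt]
      simp
    · simp only [pvA_potGo, pvB_bal, h, if_neg hlt]
      exact ih _

-- if the pass never went negative, the final balance is nonnegative
theorem pvB_bal_nonneg (s : List Char) : ∀ bal, 0 ≤ bal →
    (pvB_bal bal s).2 = false → 0 ≤ (pvB_bal bal s).1 := by
  induction s with
  | nil => intro bal h _; simpa [pvB_bal] using h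
  | cons c cs ih =>
    intro bal _ hneg
    by_cases hlt : bal + (if c == '(' then (1 : Int) else -1) < 0
    · simp only [pvB_bal, if_pos hlt] at hneg
      cases hneg
    · simp only [pvB_bal, if_neg hlt] at hneg ⊢
      exact ih _ (by omega) hneg

-- A's classification of one finished string equals B's classifying step
theorem pvA_leaf_eq (A : List Char) (st : List String × List String × List String) :
    (if pvA_valid A then (st.1 ++ [String.mk A], st.2.1, st.2.2)
     else if pvA_pot A then (st.1, st.2.1 ++ [String.mk A], st.2.2)
     else (st.1, st.2.1, st.2.2 ++ [String.mk A])) = pvB_classifyStep st A := by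
  unfold pvB_classifyStep pvA_valid pvA_pot
  rw [pvA_validGo_eq, pvA_potGo_eq]
  have hnn := pvB_bal_nonneg A 0 le_rfl
  rcases h : pvB_bal 0 A with ⟨bal, neg⟩
  rw [h] at hnn
  cases neg
  · have : 0 ≤ bal := hnn rfl
    by_cases hb : bal = 0 <;> simp [hb] <;> omega
  · simp

-- classification folds peel off the accumulator
theorem pvB_classifyStep_acc (acc : List String × List String × List String) (s : List Char) :
    pvB_classifyStep acc s =
      (acc.1 ++ (pvB_classifyStep ([], [], []) s).1,
       acc.2.1 ++ (pvB_classifyStep ([], [], []) s).2.1,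
       acc.2.2 ++ (pvB_classifyStep ([], [], []) s).2.2) := by
  unfold pvB_classifyStep
  split_ifs <;> simp

theorem pvB_classify_foldl_acc (ss : List (List Char)) : ∀ acc,
    ss.foldl pvB_classifyStep acc =
      (acc.1 ++ (ss.foldl pvB_classifyStep ([], [], [])).1,
       acc.2.1 ++ (ss.foldl pvB_classifyStep ([], [], [])).2.1,
       acc.2.2 ++ (ss.foldl pvB_classifyStep ([], [], [])).2.2) := by
  induction ss with
  | nil => intro acc; simp
  | cons s ss ih =>
    intro acc
    simp only [List.foldl_cons]
    rw [ih (pvB_classifyStep acc s), ih (pvB_classifyStep ([], [], []) s),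
        pvB_classifyStep_acc acc s]
    simp [List.append_assoc]

-- A's DFS from prefix A with m characters to go is B's classification fold over
-- all extensions of A by a length-m bracket string, in DFS order
theorem pvA_generate_eq (n : Nat) : ∀ (m fuel : Nat) (A : List Char)
    (st : List String × List String × List String), m ≤ fuel → A.length + m = 2 * n →
    pvA_generate n fuel A st = ((pvAllS m).map (A ++ ·)).foldl pvB_classifyStep st := by
  intro m
  induction m with
  | zero =>
    intro fuel A st _ hlen
    have hA : (A.length == 2 * n) = true := by simpa using by omega
    rw [pvA_generate.eq_def]
    simp only [hA, if_true, pvAllS, List.map_cons, List.map_nil, List.foldl_cons,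
      List.foldl_nil, List.append_nil]
    exact pvA_leaf_eq A st
  | succ m ih =>
    intro fuel A st hfuel hlen
    obtain ⟨f, rfl⟩ : ∃ f, fuel = f + 1 := ⟨fuel - 1, by omega⟩
    have hA : (A.length == 2 * n) = false := by simp; omega
    rw [pvA_generate.eq_def]
    simp only [hA, Bool.false_eq_true, if_false]
    rw [ih f (A ++ ['(']) st (by omega) (by simp; omega),
        ih f (A ++ [')']) _ (by omega) (by simp; omega)]
    rw [pvAllS]
    simp [List.foldl_append, Function.comp_def, List.map_map, List.append_assoc]

-- B's iterated expansion is pvAllT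
theorem pvB_strs_eq (L : Nat) :
    (List.range L).foldl (fun st _ => pvB_expand st) [[]] = pvAllT L := by
  induction L with
  | zero => rfl
  | succ L ih => rw [List.range_succ, List.foldl_append, ih]; rfl

-- appending element by element is list append
theorem pv_push_foldl (xs : List String) : ∀ acc : List String,
    xs.foldl (fun l elem => l ++ [elem]) acc = acc ++ xs := by
  induction xs with
  | nil => simp
  | cons x xs ih => intro acc; simp [ih, List.append_assoc]

-- the two loop bodies agree on every i (both ports clamp negative i via toNat)
theorem pv_outerStep_eq (acc : List String × List String × List String) (i : Int) :
    pvA_outerStep acc i = pvB_outerStep acc i := by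
  dsimp only [pvA_outerStep, pvB_outerStep]
  rw [pvB_strs_eq, ← pvAllS_eq_pvAllT]
  have h2 : (2 * i).toNat = 2 * i.toNat := by omega
  rw [h2]
  unfold pvA_generateParenthesis
  rw [pvA_generate_eq i.toNat (2 * i.toNat) (2 * i.toNat) [] ([], [], []) le_rfl (by simp)]
  simp only [List.nil_append, List.map_id']
  rw [pvB_classify_foldl_acc]
  rcases acc with ⟨a, b, c⟩
  rw [pv_push_foldl _ a, pv_push_foldl _ b, pv_push_foldl _ c,
      pvB_classify_foldl_acc _ (a, b, c)]
  simp

-- ===== VERDICT (by name: the statement is the Claim_ definition above) =====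
theorem generateDataset_spec : Claim_equal_generateDataset := by
  intro s e _ _
  unfold Spec_generateDataset generateDataset generateDataset_alt
  have : pvA_outerStep = pvB_outerStep := funext fun a => funext fun i => pv_outerStep_eq a i
  rw [this]
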